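-- pv_equiv track=rewrite | github.com/pobugi/checkio | scientific_expedition/11_caps_lock.py | caps_lock
-- ===== SOURCE A (Python) =====
-- def caps_lock(txt: str) -> str:
--     vowels = 'a'
--     res = ''
--     i = 0
--     switch = 0
--     while i <= len(txt) - 1:
--         if txt[i] in vowels:
--             switch = abs(switch-1)
--
--         if switch == 1:
--             if not txt[i] in vowels:
--                 res += txt[i].upper()
--         else:
--             if not txt[i] in vowels:
--                 res += txt[i]
--         i += 1
--     return res
-- ===== SOURCE B (Python) =====
-- def caps_lock(txt: str) -> str:
--     parts = txt.split('a')
--     return ''.join(p.upper() if i % 2 == 1 else p for i, p in enumerate(parts))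
-- ===== Notes on version B (the rewrite author's own statement) =====
-- stated objective: faster
-- what changed: Replaces the per-character while-loop toggle state machine (with quadratic string concatenation) by a single split on the toggle letter, uppercasing the odd-indexed segments, and one join.
import Mathlib
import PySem

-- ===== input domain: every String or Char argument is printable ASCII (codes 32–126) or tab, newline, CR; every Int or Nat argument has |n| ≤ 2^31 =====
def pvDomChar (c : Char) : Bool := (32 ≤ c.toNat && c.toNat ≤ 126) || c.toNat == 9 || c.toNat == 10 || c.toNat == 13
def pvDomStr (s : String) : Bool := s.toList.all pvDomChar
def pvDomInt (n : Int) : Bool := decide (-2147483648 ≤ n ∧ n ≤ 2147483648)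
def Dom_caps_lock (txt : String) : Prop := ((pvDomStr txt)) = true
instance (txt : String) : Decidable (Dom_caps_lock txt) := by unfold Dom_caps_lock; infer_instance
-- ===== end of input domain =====

-- B replaces A's per-character toggle state machine (quadratic string concatenation) by
-- split-on-'a' / uppercase the odd-indexed parts / join (measured faster; same return value).

-- ===== PORT A =====
-- the while loop over i with state (switch, res) becomes structural recursion over the
-- remaining characters with the same state; `txt[i] in 'a'` is the test c == 'a'
def capsGoA : List Char → Int → List Char → List Char
  | [], _, res => res
  | c :: rest, switch, res =>
    let switch' := if c == 'a' then |switch - 1| else switch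
    if switch' == 1 then
      if ¬ (c == 'a') then capsGoA rest switch' (res ++ [PySem.Chars.upperChar c])
      else capsGoA rest switch' res
    else
      if ¬ (c == 'a') then capsGoA rest switch' (res ++ [c])
      else capsGoA rest switch' res

def caps_lock (txt : String) : String :=
  String.mk (capsGoA txt.toList 0 [])

-- ===== PORT B =====
def caps_lock_alt (txt : String) : String :=
  let parts := PySem.Chars.splitOn txt.toList ['a']
  String.mk (PySem.Chars.join []
    ((PySem.List.enumerate parts).map
      (fun q => if q.1 % 2 == 1 then PySem.Chars.upper q.2 else q.2)))

-- ===== PRECONDITION & SPEC =====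
def Spec_caps_lock (txt : String) (out : String) : Prop := out = caps_lock_alt txt
instance (txt : String) (out : String) : Decidable (Spec_caps_lock txt out) := by unfold Spec_caps_lock; infer_instance

-- ===== CLAIM (what is proved, stated in full; the proofs are below) =====
def Claim_equal_caps_lock : Prop := ∀ (txt : String), Dom_caps_lock txt → Spec_caps_lock txt (caps_lock txt)

-- ===== LEMMAS AND PROOFS =====

-- reference splitter: split a char list on 'a'
def spA : List Char → List (List Char)
  | [] => [[]]
  | c :: cs => if c = 'a' then [] :: spA cs else (c :: (spA cs).headI) :: (spA cs).tail

theorem spA_ne_nil (cs : List Char) : spA cs ≠ [] := by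
  cases cs with
  | nil => simp [spA]
  | cons c cs => simp only [spA]; split <;> simp

theorem spA_cons_head_tail (cs : List Char) : (spA cs).headI :: (spA cs).tail = spA cs := by
  cases h : spA cs with
  | nil => exact absurd h (spA_ne_nil cs)
  | cons p ps => simp

theorem splitOn_go_eq (fuel : Nat) : ∀ (l cur : List Char) (acc : List (List Char)),
    l.length < fuel →
    PySem.Chars.splitOn.go ['a'] fuel l cur acc
      = acc.reverse ++ (spA l).modifyHead (cur.reverse ++ ·) := by
  induction fuel with
  | zero => intro l cur acc h; omega
  | succ fuel ih =>
    intro l cur acc h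
    cases l with
    | nil => simp [PySem.Chars.splitOn.go, spA]
    | cons c rest =>
      rw [PySem.Chars.splitOn.go]
      by_cases hc : c = 'a'
      · subst hc
        simp only [List.isPrefixOf, BEq.rfl, Bool.true_and, if_pos]
        rw [ih _ _ _ (by simpa using Nat.lt_of_succ_lt_succ h)]
        cases h' : spA rest <;> simp [spA, h']
      · have hpre : (['a'].isPrefixOf (c :: rest)) = false := by
          simp [List.isPrefixOf]; exact fun e => hc e.symm
        simp only [hpre, Bool.false_eq_true, if_neg, not_false_iff]
        rw [ih _ _ _ (by simpa using Nat.lt_of_succ_lt_succ h)]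
        simp only [spA, if_neg hc, List.reverse_cons]
        rw [← spA_cons_head_tail rest]
        simp

theorem splitOn_eq_spA (s : List Char) : PySem.Chars.splitOn s ['a'] = spA s := by
  rw [PySem.Chars.splitOn, splitOn_go_eq _ _ _ _ (by omega)]
  cases s with
  | nil => simp [spA]
  | cons c cs =>
    simp only [spA]
    split <;> cases h' : spA cs <;> simp [h']

-- parity-alternating concatenation: what B's enumerate/join pass computes
def altmap : Bool → List (List Char) → List Char
  | _, [] => []
  | b, p :: ps => (if b then PySem.Chars.upper p else p) ++ altmap (!b) ps

theorem join_nil_cons (p : List Char) (ps : List (List Char)) :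
    PySem.Chars.join [] (p :: ps) = p ++ PySem.Chars.join [] ps := by
  cases ps <;> simp [PySem.Chars.join, List.intercalate, List.intersperse]

theorem parity_succ (k : Int) : ((k + 1) % 2 == 1) = !(k % 2 == 1) := by
  have h2 := Int.emod_two_eq k
  have h3 := Int.emod_two_eq (k + 1)
  rcases h2 with h | h <;> rcases h3 with h' | h' <;> simp [h, h'] <;> omega

theorem join_enum_eq_altmap (parts : List (List Char)) : ∀ (k : Int),
    PySem.Chars.join []
      ((PySem.List.enumerate parts k).map
        (fun q => if q.1 % 2 == 1 then PySem.Chars.upper q.2 else q.2))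
      = altmap (k % 2 == 1) parts := by
  induction parts with
  | nil => intro k; simp [PySem.List.enumerate, altmap, PySem.Chars.join, List.intercalate]
  | cons p ps ih =>
    intro k
    rw [PySem.List.enumerate_cons, List.map_cons, join_nil_cons, ih (k + 1), parity_succ,
      altmap]

theorem altmap_spA_cons (b : Bool) (cs : List Char) :
    altmap b ((spA cs).headI :: (spA cs).tail) = altmap b (spA cs) := by
  rw [spA_cons_head_tail]

theorem capsGoA_eq_altmap (cs : List Char) : ∀ (b : Bool) (res : List Char),
    capsGoA cs (if b then 1 else 0) res = res ++ altmap b (spA cs) := by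
  induction cs with
  | nil => intro b res; cases b <;> simp [capsGoA, spA, altmap, PySem.Chars.upper]
  | cons c rest ih =>
    intro b res
    rw [capsGoA]
    by_cases hc : c = 'a'
    · subst hc
      cases b with
      | true =>
        norm_num
        rw [show ((0 : Int)) = (if false then 1 else 0) from rfl, ih false res]
        simp [spA, altmap, PySem.Chars.upper]
      | false =>
        norm_num
        rw [show ((1 : Int)) = (if true then 1 else 0) from rfl, ih true res]
        simp [spA, altmap]
    · have hcb : (c == 'a') = false := by simp [hc]
      cases b with
      | true =>
        simp only [hcb, Bool.false_eq_true, if_neg, not_false_iff, BEq.rfl, if_pos]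
        rw [show ((1 : Int)) = (if true then 1 else 0) from rfl, ih true]
        rw [← altmap_spA_cons true rest]
        simp [spA, if_neg hc, altmap, PySem.Chars.upper]
      | false =>
        simp only [hcb, Bool.false_eq_true, if_neg, not_false_iff, if_true]
        norm_num
        rw [show ((0 : Int)) = (if false then 1 else 0) from rfl, ih false]
        rw [← altmap_spA_cons false rest]
        simp [spA, if_neg hc, altmap]

-- ===== VERDICT (by name: the statement is the Claim_ definition above) =====
theorem caps_lock_spec : Claim_equal_caps_lock := by
  intro txt _
  unfold Spec_caps_lock caps_lock caps_lock_alt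
  rw [splitOn_eq_spA]
  have h1 := capsGoA_eq_altmap txt.toList false []
  have h2 := join_enum_eq_altmap (spA txt.toList) 0
  simp only [if_neg (by decide : ¬ false = true), List.nil_append] at h1
  rw [h1]; simp only [h2]; norm_num
  rfl
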